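-- pv_equiv track=rewrite | github.com/monoprimula/Pixly | goruntu_isleme/morfolojik_islemler.py | yapi_elemani_olustur
-- ===== SOURCE A (Python) =====
-- def yapi_elemani_olustur(sekil='kare', boyut=3):
--     boyut = int(boyut)
--     if boyut % 2 == 0:
--         boyut += 1
--
--     if sekil == 'kare':
--         # Kare yapı elemanı: tüm hücreler 1 (aktif)
--         return [[1 for _ in range(boyut)] for _ in range(boyut)]
--
--     elif sekil == 'daire':
--         # Daire yapı elemanı: merkezden uzaklığa göre belirlenir
--         yapi_elemani = [[0 for _ in range(boyut)] for _ in range(boyut)]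
--         merkez = boyut // 2
--         for i in range(boyut):
--             for j in range(boyut):
--                 # Eğer piksel merkezden yarıçap içinde ise 1 yapılır
--                 if (i - merkez)**2 + (j - merkez)**2 <= merkez**2:
--                     yapi_elemani[i][j] = 1
--         return yapi_elemani
--
--     else:
--         # Geçersiz şekil verilirse varsayılan kare döner
--         return [[1 for _ in range(boyut)] for _ in range(boyut)]
-- ===== SOURCE B (Python) =====
-- def yapi_elemani_olustur(sekil='kare', boyut=3):
--     boyut = int(boyut)
--     if boyut % 2 == 0:
--         boyut += 1
--     if sekil == 'daire':
--         # per-row closed-form span instead of testing every cell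
--         merkez = boyut // 2
--         r2 = merkez * merkez
--         rows = []
--         for i in range(boyut):
--             dy = i - merkez
--             rem = r2 - dy * dy
--             w = merkez
--             while w * w > rem:
--                 w -= 1
--             rows.append([0] * (merkez - w) + [1] * (2 * w + 1) + [0] * (merkez - w))
--         return rows
--     return [[1] * boyut for _ in range(boyut)]
-- ===== Notes on version B (the rewrite author's own statement) =====
-- stated objective: alternative
-- what changed: The daire branch no longer tests every cell's squared distance in an n*n double loop over a mutated zero matrix; it computes, per row, the integer half-width w of the disc (largest w with w*w <= merkez^2 - dy^2, found by decrementing from merkez) and builds each row directly as [0]*(merkez-w)+[1]*(2w+1)+[0]*(merkez-w).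
import Mathlib
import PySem

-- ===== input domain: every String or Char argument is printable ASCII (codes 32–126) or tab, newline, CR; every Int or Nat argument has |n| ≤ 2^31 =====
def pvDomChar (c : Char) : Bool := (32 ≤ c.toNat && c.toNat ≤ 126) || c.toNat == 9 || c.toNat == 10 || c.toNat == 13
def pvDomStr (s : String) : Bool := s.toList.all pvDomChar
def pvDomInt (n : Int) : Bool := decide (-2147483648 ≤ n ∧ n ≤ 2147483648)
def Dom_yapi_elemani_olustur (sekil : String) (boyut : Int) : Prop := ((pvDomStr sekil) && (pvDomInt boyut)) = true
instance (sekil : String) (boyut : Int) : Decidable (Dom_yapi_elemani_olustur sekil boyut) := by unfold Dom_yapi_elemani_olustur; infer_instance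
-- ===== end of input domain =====

-- B replaces the daire branch's per-cell n×n distance test over a mutated zero matrix by a per-row
-- closed-form span: an integer half-width w per row, each row built as zeros/ones/zeros blocks (alternative decomposition).

-- ===== PORT A =====
def yapi_elemani_olustur (sekil : String) (boyut : Int) : List (List Int) :=
  let b := if PySem.Int.mod boyut 2 == 0 then boyut + 1 else boyut
  if sekil == "kare" then
    (PySem.List.pyRange 0 b 1).map (fun _ => (PySem.List.pyRange 0 b 1).map (fun _ => (1 : Int)))
  else if sekil == "daire" then
    let yapi := (PySem.List.pyRange 0 b 1).map (fun _ => (PySem.List.pyRange 0 b 1).map (fun _ => (0 : Int)))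
    let merkez := PySem.Int.floordiv b 2
    (PySem.List.pyRange 0 b 1).foldl (fun m i =>
      (PySem.List.pyRange 0 b 1).foldl (fun m j =>
        if (i - merkez) ^ 2 + (j - merkez) ^ 2 ≤ merkez ^ 2 then
          m.modify i.toNat (fun row => row.set j.toNat 1)
        else m) m) yapi
  else
    (PySem.List.pyRange 0 b 1).map (fun _ => (PySem.List.pyRange 0 b 1).map (fun _ => (1 : Int)))

-- ===== PORT B =====
-- the `while w * w > rem: w -= 1` loop of Source B, as structural recursion on w
def pvSpan (rem : Int) : Nat → Nat
  | 0 => 0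
  | w + 1 => if rem < ((w : Int) + 1) * ((w : Int) + 1) then pvSpan rem w else w + 1

def yapi_elemani_olustur_alt (sekil : String) (boyut : Int) : List (List Int) :=
  let b := if PySem.Int.mod boyut 2 == 0 then boyut + 1 else boyut
  if sekil == "daire" then
    let merkez := PySem.Int.floordiv b 2
    let r2 := merkez * merkez
    (PySem.List.pyRange 0 b 1).map (fun i =>
      let dy := i - merkez
      let rem := r2 - dy * dy
      let w : Int := (pvSpan rem merkez.toNat : Int)
      PySem.List.pyRepeat [(0 : Int)] (merkez - w) ++ PySem.List.pyRepeat [(1 : Int)] (2 * w + 1)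
        ++ PySem.List.pyRepeat [(0 : Int)] (merkez - w))
  else
    (PySem.List.pyRange 0 b 1).map (fun _ => PySem.List.pyRepeat [(1 : Int)] b)

-- ===== PRECONDITION & SPEC =====
def Spec_yapi_elemani_olustur (sekil : String) (boyut : Int) (out : List (List Int)) : Prop := out = yapi_elemani_olustur_alt sekil boyut
instance (sekil : String) (boyut : Int) (out : List (List Int)) : Decidable (Spec_yapi_elemani_olustur sekil boyut out) := by unfold Spec_yapi_elemani_olustur; infer_instance

-- ===== CLAIM (what is proved, stated in full; the proofs are below) =====
def Claim_equal_yapi_elemani_olustur : Prop := ∀ (sekil : String) (boyut : Int), Dom_yapi_elemani_olustur sekil boyut → Spec_yapi_elemani_olustur sekil boyut (yapi_elemani_olustur sekil boyut)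

-- ===== LEMMAS AND PROOFS =====

-- basic pvSpan facts
theorem pvSpan_le (rem : Int) (k : Nat) : pvSpan rem k ≤ k := by
  induction k with
  | zero => simp [pvSpan]
  | succ w ih => simp only [pvSpan]; split <;> omega

theorem pvSpan_sq_le (rem : Int) (k : Nat) (h : 0 ≤ rem) :
    ((pvSpan rem k : Int)) * (pvSpan rem k) ≤ rem := by
  induction k with
  | zero => simpa [pvSpan]
  | succ w ih =>
    simp only [pvSpan]; split
    · exact ih
    · rename_i hge; push_cast; linarith [not_lt.mp hge]

theorem le_pvSpan (rem : Int) (k t : Nat) (ht : t ≤ k) (h : (t : Int) * t ≤ rem) :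
    t ≤ pvSpan rem k := by
  induction k with
  | zero => omega
  | succ w ih =>
    simp only [pvSpan]; split
    · rename_i hlt
      have htw : t ≤ w := by
        by_contra hc
        have het : t = w + 1 := by omega
        subst het; push_cast at h; linarith
      exact ih htw
    · omega

-- getD facts for set / modify
theorem pv_getD_set_self (l : List Int) (i : Nat) (a d : Int) (h : i < l.length) :
    (l.set i a).getD i d = a := by
  simp [List.getD, h]

theorem pv_getD_set_ne (l : List Int) (i j : Nat) (a d : Int) (h : i ≠ j) :
    (l.set i a).getD j d = l.getD j d := by
  simp [List.getD, h]

theorem pv_getD_modify_self {α : Type} (l : List α) (i : Nat) (f : α → α) (d : α) (h : i < l.length) :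
    (l.modify i f).getD i d = f (l.getD i d) := by
  simp [List.getD, h]

theorem pv_getD_modify_ne {α : Type} (l : List α) (i j : Nat) (f : α → α) (d : α) (h : i ≠ j) :
    (l.modify i f).getD j d = l.getD j d := by
  simp [List.getD, h]

theorem pv_ext_getD {α : Type} (d : α) (l₁ l₂ : List α) (hl : l₁.length = l₂.length)
    (h : ∀ t, t < l₁.length → l₁.getD t d = l₂.getD t d) : l₁ = l₂ := by
  apply List.ext_getElem hl
  intro i h1 h2
  rw [← List.getD_eq_getElem l₁ d h1, ← List.getD_eq_getElem l₂ d h2]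
  exact h i h1

-- modify helpers
theorem modify_id_eq {α : Type} (l : List α) (t : Nat) : l.modify t (fun x => x) = l := by
  apply List.ext_getElem
  · simp
  · intro i h1 h2; rw [List.getElem_modify]; split <;> rfl

theorem modify_modify_eq {α : Type} (l : List α) (t : Nat) (f g : α → α) :
    (l.modify t f).modify t g = l.modify t (fun x => g (f x)) := by
  apply List.ext_getElem
  · simp
  · intro i h1 h2
    rw [List.getElem_modify, List.getElem_modify, List.getElem_modify]
    split <;> simp_all

-- the inner j-loop only rewrites row t: pull the modify out of the fold
theorem foldl_if_modify (l : List Int) (t : Nat) (Q : Int → Prop) [DecidablePred Q]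
    (g : Int → List Int → List Int) (m : List (List Int)) :
    l.foldl (fun m j => if Q j then m.modify t (g j) else m) m
      = m.modify t (fun row => l.foldl (fun r j => if Q j then g j r else r) row) := by
  induction l generalizing m with
  | nil => simp [modify_id_eq]
  | cons a l ih =>
    simp only [List.foldl_cons]
    by_cases ha : Q a
    · simp only [if_pos ha, ih, modify_modify_eq]
    · simp only [if_neg ha, ih]

-- length preservation for the two fold shapes
theorem foldl_set_length (l : List Int) (Q : Int → Prop) [DecidablePred Q] (r : List Int) :
    (l.foldl (fun r j => if Q j then r.set j.toNat 1 else r) r).length = r.length := by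
  induction l generalizing r with
  | nil => rfl
  | cons a l ih => simp only [List.foldl_cons]; rw [ih]; split <;> simp

theorem foldl_modify_length (l : List Int) (h : Int → List Int → List Int) (m : List (List Int)) :
    (l.foldl (fun m i => m.modify i.toNat (h i)) m).length = m.length := by
  induction l generalizing m with
  | nil => rfl
  | cons a l ih => simp only [List.foldl_cons]; rw [ih]; simp

-- element characterisation of the inner j-loop
theorem foldl_set_getD (l : List Int) (Q : Int → Prop) [DecidablePred Q] (r : List Int)
    (hpos : ∀ j ∈ l, 0 ≤ j) (t : Nat) (ht : t < r.length) :
    (l.foldl (fun r j => if Q j then r.set j.toNat 1 else r) r).getD t 0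
      = if (t : Int) ∈ l ∧ Q t then 1 else r.getD t 0 := by
  induction l generalizing r with
  | nil => simp
  | cons a l ih =>
    have ha : 0 ≤ a := hpos a (by simp)
    have hpos' : ∀ j ∈ l, 0 ≤ j := fun j hj => hpos j (by simp [hj])
    simp only [List.foldl_cons]
    by_cases hQ : Q a
    · simp only [if_pos hQ]
      rw [ih (r.set a.toNat 1) hpos' (by simpa using ht)]
      by_cases hat : a = (t : Int)
      · have h1 : a.toNat = t := by omega
        rw [h1, pv_getD_set_self r t 1 0 ht, ite_self,
          if_pos ⟨by rw [← hat]; exact List.mem_cons_self, hat ▸ hQ⟩]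
      · have hne : a.toNat ≠ t := by omega
        rw [pv_getD_set_ne r a.toNat t 1 0 hne]
        have hcond : ((t : Int) ∈ a :: l ∧ Q t) ↔ ((t : Int) ∈ l ∧ Q t) := by
          simp only [List.mem_cons]
          constructor
          · rintro ⟨h | h, hq⟩
            · exact absurd h.symm hat
            · exact ⟨h, hq⟩
          · rintro ⟨h, hq⟩; exact ⟨Or.inr h, hq⟩
        rw [if_congr hcond.symm rfl rfl]
    · simp only [if_neg hQ]
      rw [ih r hpos' ht]
      have hcond : ((t : Int) ∈ a :: l ∧ Q t) ↔ ((t : Int) ∈ l ∧ Q t) := by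
        simp only [List.mem_cons]
        constructor
        · rintro ⟨h | h, hq⟩
          · exact absurd (h ▸ hq) hQ
          · exact ⟨h, hq⟩
        · rintro ⟨h, hq⟩; exact ⟨Or.inr h, hq⟩
      rw [if_congr hcond.symm rfl rfl]
-- element characterisation of the outer i-loop (rows are touched once each: Nodup)
theorem foldl_modify_getD (l : List Int) (h : Int → List Int → List Int) (m : List (List Int))
    (hnd : l.Nodup) (hpos : ∀ i ∈ l, 0 ≤ i) (t : Nat) (ht : t < m.length) :
    (l.foldl (fun m i => m.modify i.toNat (h i)) m).getD t []
      = if (t : Int) ∈ l then h t (m.getD t []) else m.getD t [] := by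
  induction l generalizing m with
  | nil => simp
  | cons a l ih =>
    have ha : 0 ≤ a := hpos a (by simp)
    have hpos' : ∀ i ∈ l, 0 ≤ i := fun i hi => hpos i (by simp [hi])
    obtain ⟨hna, hnd'⟩ := List.nodup_cons.mp hnd
    simp only [List.foldl_cons]
    rw [ih (m.modify a.toNat (h a)) hnd' hpos' (by simpa using ht)]
    by_cases hat : a = (t : Int)
    · have h1 : a.toNat = t := by omega
      rw [h1, pv_getD_modify_self m t (h a) [] ht, ← hat,
        if_neg hna, if_pos List.mem_cons_self]
    · have hne : a.toNat ≠ t := by omega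
      rw [pv_getD_modify_ne m a.toNat t (h a) [] hne]
      have hcond : ((t : Int) ∈ a :: l) ↔ ((t : Int) ∈ l) := by
        simp only [List.mem_cons]
        constructor
        · rintro (h | h)
          · exact absurd h.symm hat
          · exact h
        · exact Or.inr
      rw [if_congr hcond.symm rfl rfl]

-- constant row: a comprehension of ones is list repetition
theorem ones_row (b : Int) :
    (PySem.List.pyRange 0 b 1).map (fun _ => (1 : Int)) = PySem.List.pyRepeat [(1 : Int)] b := by
  rw [PySem.List.pyRepeat_singleton, List.map_const', PySem.List.length_pyRange_one]
  norm_num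

-- the zeros/ones/zeros block row, elementwise
theorem block_row_getD (M W k : Nat) (hW : W ≤ M) (hk : k < 2 * M + 1) :
    (List.replicate (M - W) (0 : Int) ++ List.replicate (2 * W + 1) (1 : Int)
      ++ List.replicate (M - W) (0 : Int)).getD k 0
    = if M - W ≤ k ∧ k < M + W + 1 then 1 else 0 := by
  by_cases h1 : k < M - W
  · rw [List.getD_append _ _ _ _ (by simp [List.length_append]; omega)]
    rw [List.getD_append _ _ _ _ (by simp; omega)]
    rw [List.getD_eq_getElem _ _ (by simp; omega), List.getElem_replicate, if_neg (by omega)]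
  · by_cases h2 : k < M + W + 1
    · rw [List.getD_append _ _ _ _ (by simp [List.length_append]; omega)]
      rw [List.getD_append_right _ _ _ _ (by simp; omega)]
      rw [List.getD_eq_getElem _ _ (by simp; omega), List.getElem_replicate, if_pos (by omega)]
    · rw [List.getD_append_right _ _ _ _ (by simp [List.length_append]; omega)]
      rw [List.getD_eq_getElem _ _ (by simp [List.length_append]; omega), List.getElem_replicate,
        if_neg (by omega)]

set_option maxHeartbeats 1000000 in
-- the core: on an odd positive-or-not size the mutated-matrix double loop equals the per-row span rows
theorem daire_eq (b : Int) (hodd : b % 2 = 1) :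
    (PySem.List.pyRange 0 b 1).foldl (fun m i =>
      (PySem.List.pyRange 0 b 1).foldl (fun m j =>
        if (i - PySem.Int.floordiv b 2) ^ 2 + (j - PySem.Int.floordiv b 2) ^ 2 ≤ (PySem.Int.floordiv b 2) ^ 2 then
          m.modify i.toNat (fun row => row.set j.toNat 1)
        else m) m)
      ((PySem.List.pyRange 0 b 1).map (fun _ => (PySem.List.pyRange 0 b 1).map (fun _ => (0 : Int))))
    = (PySem.List.pyRange 0 b 1).map (fun i =>
        PySem.List.pyRepeat [(0 : Int)] (PySem.Int.floordiv b 2 - ((pvSpan ((PySem.Int.floordiv b 2) * (PySem.Int.floordiv b 2) - (i - PySem.Int.floordiv b 2) * (i - PySem.Int.floordiv b 2)) (PySem.Int.floordiv b 2).toNat : Nat) : Int))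
        ++ PySem.List.pyRepeat [(1 : Int)] (2 * ((pvSpan ((PySem.Int.floordiv b 2) * (PySem.Int.floordiv b 2) - (i - PySem.Int.floordiv b 2) * (i - PySem.Int.floordiv b 2)) (PySem.Int.floordiv b 2).toNat : Nat) : Int) + 1)
        ++ PySem.List.pyRepeat [(0 : Int)] (PySem.Int.floordiv b 2 - ((pvSpan ((PySem.Int.floordiv b 2) * (PySem.Int.floordiv b 2) - (i - PySem.Int.floordiv b 2) * (i - PySem.Int.floordiv b 2)) (PySem.Int.floordiv b 2).toNat : Nat) : Int))) := by
  by_cases hb : b ≤ 0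
  · rw [PySem.List.pyRange_one_eq_nil hb]; rfl
  have hbpos : 0 < b := by omega
  clear hb
  set m := PySem.Int.floordiv b 2 with hm
  have hmd : m = b / 2 := PySem.Int.floordiv_eq_ediv_of_pos (by omega)
  have hb2 : b = 2 * m + 1 := by omega
  have hm0 : 0 ≤ m := by omega
  have hMb : 2 * m.toNat + 1 = b.toNat := by omega
  rw [show (fun (mm : List (List Int)) (i : Int) =>
      (PySem.List.pyRange 0 b 1).foldl (fun mm j =>
        if (i - m) ^ 2 + (j - m) ^ 2 ≤ m ^ 2 then mm.modify i.toNat (fun row => row.set j.toNat 1) else mm) mm)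
    = (fun (mm : List (List Int)) (i : Int) => mm.modify i.toNat
        (fun row => (PySem.List.pyRange 0 b 1).foldl
          (fun r j => if (i - m) ^ 2 + (j - m) ^ 2 ≤ m ^ 2 then r.set j.toNat 1 else r) row)) from by
      funext mm i
      exact foldl_if_modify (PySem.List.pyRange 0 b 1) i.toNat
        (fun j => (i - m) ^ 2 + (j - m) ^ 2 ≤ m ^ 2) (fun j row => row.set j.toNat 1) mm]
  apply pv_ext_getD []
  · rw [foldl_modify_length]; simp
  · intro t ht1
    have htb : t < b.toNat := by
      simpa [foldl_modify_length, PySem.List.length_pyRange_one] using ht1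
    have hlen0 : t < ((PySem.List.pyRange 0 b 1).map (fun _ => (PySem.List.pyRange 0 b 1).map (fun _ => (0 : Int)))).length := by
      simp [PySem.List.length_pyRange_one]; omega
    rw [foldl_modify_getD _ _ _ (PySem.List.nodup_pyRange_one 0 b)
        (fun i hi => ((PySem.List.mem_pyRange_one).mp hi).1) t hlen0]
    rw [if_pos (by rw [PySem.List.mem_pyRange_one]; omega)]
    have hzmat : ((PySem.List.pyRange 0 b 1).map (fun _ => (PySem.List.pyRange 0 b 1).map (fun _ => (0 : Int)))).getD t []
        = (PySem.List.pyRange 0 b 1).map (fun _ => (0 : Int)) := by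
      rw [List.getD_eq_getElem _ _ hlen0, List.getElem_map]
    rw [hzmat]
    have hmapR : ((PySem.List.pyRange 0 b 1).map (fun i =>
        PySem.List.pyRepeat [(0 : Int)] (m - ((pvSpan (m * m - (i - m) * (i - m)) m.toNat : Nat) : Int))
        ++ PySem.List.pyRepeat [(1 : Int)] (2 * ((pvSpan (m * m - (i - m) * (i - m)) m.toNat : Nat) : Int) + 1)
        ++ PySem.List.pyRepeat [(0 : Int)] (m - ((pvSpan (m * m - (i - m) * (i - m)) m.toNat : Nat) : Int)))).getD t []
        = PySem.List.pyRepeat [(0 : Int)] (m - ((pvSpan (m * m - ((t : Int) - m) * ((t : Int) - m)) m.toNat : Nat) : Int))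
        ++ PySem.List.pyRepeat [(1 : Int)] (2 * ((pvSpan (m * m - ((t : Int) - m) * ((t : Int) - m)) m.toNat : Nat) : Int) + 1)
        ++ PySem.List.pyRepeat [(0 : Int)] (m - ((pvSpan (m * m - ((t : Int) - m) * ((t : Int) - m)) m.toNat : Nat) : Int)) := by
      rw [List.getD_eq_getElem _ _ (by simp [PySem.List.length_pyRange_one]; omega), List.getElem_map,
        PySem.List.getElem_pyRange_one]
      norm_num
    rw [hmapR]
    set w : Nat := pvSpan (m * m - ((t : Int) - m) * ((t : Int) - m)) m.toNat with hw
    have hrem0 : 0 ≤ m * m - ((t : Int) - m) * ((t : Int) - m) := by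
      have h0t : (0 : Int) ≤ (t : Int) := Int.natCast_nonneg t
      have h2m : (t : Int) ≤ 2 * m := by omega
      nlinarith [mul_nonneg h0t (by omega : (0 : Int) ≤ 2 * m - (t : Int))]
    have hwle : w ≤ m.toNat := pvSpan_le _ _
    have hwsq : ((w : Int)) * w ≤ m * m - ((t : Int) - m) * ((t : Int) - m) := pvSpan_sq_le _ _ hrem0
    have hsub : (m - (w : Int)).toNat = m.toNat - w := by omega
    have h2w : (2 * (w : Int) + 1).toNat = 2 * w + 1 := by omega
    apply pv_ext_getD 0
    · rw [foldl_set_length]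
      simp only [List.length_append, PySem.List.pyRepeat_singleton, List.length_replicate,
        List.length_map, PySem.List.length_pyRange_one]
      omega
    · intro k hk1
      have hkb : k < b.toNat := by
        simpa [foldl_set_length, PySem.List.length_pyRange_one] using hk1
      have hkrow : k < ((PySem.List.pyRange 0 b 1).map (fun _ => (0 : Int))).length := by
        simp [PySem.List.length_pyRange_one]; omega
      rw [foldl_set_getD _ _ _ (fun j hj => ((PySem.List.mem_pyRange_one).mp hj).1) k hkrow]
      have hzrow : ((PySem.List.pyRange 0 b 1).map (fun _ => (0 : Int))).getD k 0 = 0 := by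
        rw [List.getD_eq_getElem _ _ hkrow, List.getElem_map]
      rw [hzrow]
      simp only [PySem.List.pyRepeat_singleton, hsub, h2w]
      rw [block_row_getD m.toNat w k hwle (by omega)]
      -- the distance test is exactly membership of [m-w, m+w]
      have hiff : (((t : Int) - m) ^ 2 + ((k : Int) - m) ^ 2 ≤ m ^ 2) ↔ (m.toNat - w ≤ k ∧ k < m.toNat + w + 1) := by
        constructor
        · intro hle
          have hksq : ((k : Int) - m) * ((k : Int) - m) ≤ m * m - ((t : Int) - m) * ((t : Int) - m) := by
            nlinarith
          set u : Nat := ((k : Int) - m).natAbs with hu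
          have huu : ((u : Int)) * u = ((k : Int) - m) * ((k : Int) - m) := by
            exact_mod_cast Int.natAbs_mul_self
          have huM : u ≤ m.toNat := by
            have hum : (u : Int) ≤ m := by nlinarith [huu, hksq, hrem0]
            omega
          have huw : u ≤ w := le_pvSpan _ _ _ huM (by rw [huu]; exact hksq)
          omega
        · intro hk
          have habs : ((k : Int) - m).natAbs ≤ w := by omega
          have hle2 : ((k : Int) - m) * ((k : Int) - m) ≤ (w : Int) * w := by
            have huu : ((((k : Int) - m).natAbs : Int)) * (((k : Int) - m).natAbs : Int) = ((k : Int) - m) * ((k : Int) - m) := by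
              exact_mod_cast Int.natAbs_mul_self
            nlinarith [habs, (by exact_mod_cast habs : ((((k : Int) - m).natAbs : Int)) ≤ (w : Int)), Int.natCast_nonneg (((k : Int) - m).natAbs)]
          nlinarith
      by_cases hP : ((t : Int) - m) ^ 2 + ((k : Int) - m) ^ 2 ≤ m ^ 2
      · rw [if_pos ⟨by rw [PySem.List.mem_pyRange_one]; omega, hP⟩, if_pos (hiff.mp hP)]
      · rw [if_neg (by rintro ⟨-, hq⟩; exact hP hq), if_neg (fun hc => hP (hiff.mpr hc))]

-- ===== VERDICT (by name: the statement is the Claim_ definition above) =====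
set_option maxHeartbeats 1000000 in
theorem yapi_elemani_olustur_spec : Claim_equal_yapi_elemani_olustur := by
  intro sekil boyut _
  unfold Spec_yapi_elemani_olustur yapi_elemani_olustur yapi_elemani_olustur_alt
  dsimp only
  set b := if PySem.Int.mod boyut 2 == 0 then boyut + 1 else boyut with hb
  have hodd : b % 2 = 1 := by
    rw [hb]
    have hmod : PySem.Int.mod boyut 2 = boyut % 2 := PySem.Int.mod_eq_emod_of_pos (by norm_num)
    by_cases h : PySem.Int.mod boyut 2 == 0
    · rw [if_pos h]; rw [beq_iff_eq, hmod] at h; omega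
    · rw [if_neg (by simpa using h)]; rw [beq_iff_eq, hmod] at h; omega
  by_cases hk : sekil = "kare"
  · subst hk
    rw [if_pos (by rfl), if_neg (by decide)]
    exact List.map_congr_left (fun i _ => ones_row b)
  · rw [if_neg (by simpa using hk)]
    by_cases hd : sekil = "daire"
    · subst hd
      rw [if_pos (by rfl), if_pos (by rfl)]
      exact daire_eq b hodd
    · rw [if_neg (by simpa using hd), if_neg (by simpa using hd)]
      exact List.map_congr_left (fun i _ => ones_row b)
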